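-- pv_equiv track=rewrite | github.com/just-rudy/bmstu_py_sem2 | calculutor.py | check_is_fiveish
-- ===== SOURCE A (Python) =====
-- def check_is_fiveish(num):
--     is_correct_five = True
--     if len(num) == 0 or num.count("-") > 1 or num.find("-") > 0 or num.count(".") > 1 or num.count(",") > 0:
--         is_correct_five = False
--     else:
--         for i in num:
--             if i not in "01234.":
--                 is_correct_five = False
--                 break
--     return is_correct_five
-- ===== SOURCE B (Python) =====
-- def check_is_fiveish(num):
--     head, _, tail = num.partition('.')
--     return bool(num) and set(head) <= set('01234') and set(tail) <= set('01234')
-- ===== Notes on version B (the rewrite author's own statement) =====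
-- stated objective: simpler
-- what changed: B splits the string at the first dot with str.partition and checks both pieces are made of the digits 0-4 via set inclusion, replacing A's count/find guard battery plus character loop with break; a second dot lands in the tail and fails the digit check, so count('.')<=1 falls out structurally.
import Mathlib
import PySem

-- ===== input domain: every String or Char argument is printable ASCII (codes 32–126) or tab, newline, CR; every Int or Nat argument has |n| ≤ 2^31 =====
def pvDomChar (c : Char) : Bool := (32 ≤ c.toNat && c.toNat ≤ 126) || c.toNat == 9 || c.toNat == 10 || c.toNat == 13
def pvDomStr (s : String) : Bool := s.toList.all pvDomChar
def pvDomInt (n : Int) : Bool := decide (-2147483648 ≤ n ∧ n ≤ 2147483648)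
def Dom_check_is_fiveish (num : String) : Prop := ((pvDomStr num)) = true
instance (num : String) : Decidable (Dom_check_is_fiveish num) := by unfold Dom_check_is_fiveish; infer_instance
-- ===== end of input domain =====

-- B replaces A's count/find guards plus char loop with a split-at-first-dot and a
-- digits-only check of both pieces (objective: simpler); same values on all inputs.

-- ===== PORT A =====
-- the 'for i in num: if i not in "01234.": …; break' loop; a 1-char 'i not in s' is
-- char membership in s's characters — exact
def pvLoopA : List Char → Bool
  | [] => true
  | c :: cs => if ("01234.".toList.contains c) = false then false else pvLoopA cs

def check_is_fiveish (num : String) : Bool :=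
  if PySem.Str.len num == 0 || PySem.Str.count num "-" > 1 || PySem.Str.find num "-" > 0
      || PySem.Str.count num "." > 1 || PySem.Str.count num "," > 0 then
    false
  else
    pvLoopA num.toList

-- ===== PORT B =====
-- num.partition('.') — split at the FIRST '.' (hand-ported step for step: exact; the
-- separator itself is dropped, as B never uses it)
def pvPartitionDot : List Char → List Char × List Char
  | [] => ([], [])
  | c :: cs =>
    if c = '.' then ([], cs)
    else
      let p := pvPartitionDot cs
      (c :: p.1, p.2)

-- set(x) <= set('01234') is 'every char of x is one of 0-4' — exact
def check_is_fiveish_alt (num : String) : Bool :=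
  let p := pvPartitionDot num.toList
  !num.toList.isEmpty && p.1.all (fun c => "01234".toList.contains c)
    && p.2.all (fun c => "01234".toList.contains c)

-- ===== PRECONDITION & SPEC =====
def Spec_check_is_fiveish (num : String) (out : Bool) : Prop := out = check_is_fiveish_alt num
instance (num : String) (out : Bool) : Decidable (Spec_check_is_fiveish num out) := by unfold Spec_check_is_fiveish; infer_instance

-- ===== CLAIM (what is proved, stated in full; the proofs are below) =====
def Claim_equal_check_is_fiveish : Prop := ∀ (num : String), Dom_check_is_fiveish num → Spec_check_is_fiveish num (check_is_fiveish num)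

-- ===== LEMMAS AND PROOFS =====

-- proof-side abbreviations for the two character classes
def pvD (c : Char) : Bool := "01234".toList.contains c
def pvF (c : Char) : Bool := "01234.".toList.contains c

theorem pvF_eq (c : Char) : pvF c = (pvD c || c == '.') := by
  by_cases h : c = '.'
  · subst h; rfl
  · rw [beq_eq_false_iff_ne.mpr h, Bool.or_false]
    simp [pvF, pvD, h, Bool.or_comm, Bool.or_left_comm]

theorem pvD_dot : pvD '.' = false := rfl

-- the common characterization both ports will be proved equal to
def pvGood (l : List Char) : Bool :=
  !l.isEmpty && l.all pvF && (l.count '.' ≤ 1)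

-- PySem.Chars.count with a single-char needle is List.count
theorem pv_count_go_singleton (c : Char) :
    ∀ (fuel : ℕ) (l : List Char) (acc : ℕ), l.length ≤ fuel →
      PySem.Chars.count.go [c] fuel l acc = acc + l.count c := by
  intro fuel
  induction fuel with
  | zero =>
    intro l acc h
    have : l = [] := List.length_eq_zero_iff.mp (Nat.le_zero.mp h)
    subst this
    simp [PySem.Chars.count.go]
  | succ n ih =>
    intro l acc h
    cases l with
    | nil => simp [PySem.Chars.count.go]
    | cons a t =>
      by_cases hc : a = c
      · subst hc
        rw [show PySem.Chars.count.go [a] (n+1) (a :: t) acc =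
              PySem.Chars.count.go [a] n t (acc + 1) by
            simp [PySem.Chars.count.go, List.isPrefixOf]]
        rw [ih t (acc + 1) (by simpa using Nat.lt_succ_iff.mp (by simpa using h))]
        simp [List.count_cons]
        omega
      · rw [show PySem.Chars.count.go [c] (n+1) (a :: t) acc =
              PySem.Chars.count.go [c] n t acc by
            simp [PySem.Chars.count.go, List.isPrefixOf, Ne.symm hc]]
        rw [ih t acc (by simpa using Nat.lt_succ_iff.mp (by simpa using h))]
        simp [hc]

theorem pv_count_singleton (l : List Char) (c : Char) :
    PySem.Chars.count l [c] = l.count c := by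
  simp only [PySem.Chars.count, List.isEmpty_cons, if_false, Bool.false_eq_true]
  simpa using pv_count_go_singleton c l.length l 0 le_rfl

theorem pv_singleton_infix_iff (c : Char) (l : List Char) : [c] <:+: l ↔ c ∈ l := by
  constructor
  · intro h
    exact h.subset (by simp)
  · intro h
    obtain ⟨s, t, rfl⟩ := List.append_of_mem h
    exact ⟨s, t, by simp⟩

-- the loop of A is an 'all chars allowed' check
theorem pv_loopA_eq (l : List Char) : pvLoopA l = l.all pvF := by
  induction l with
  | nil => rfl
  | cons c cs ih =>
    cases h : pvF c with
    | false =>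
      simp only [pvLoopA, List.all_cons]
      rw [show ("01234.".toList.contains c) = pvF c from rfl, h]
      simp
    | true =>
      simp only [pvLoopA, List.all_cons]
      rw [show ("01234.".toList.contains c) = pvF c from rfl, h]
      simp [ih]

-- A equals the characterization
theorem pv_A_eq (num : String) : check_is_fiveish num = pvGood num.toList := by
  unfold check_is_fiveish pvGood
  rw [pv_loopA_eq]
  by_cases hall : num.toList.all pvF = true
  · -- all chars allowed ⇒ no '-' and no ',' in the string
    have hmem : ∀ c ∈ num.toList, pvF c = true := List.all_eq_true.mp hall
    have hdash : '-' ∉ num.toList := fun h => by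
      have := hmem _ h; simp [pvF] at this
    have hcomma : ',' ∉ num.toList := fun h => by
      have := hmem _ h; simp [pvF] at this
    have hcd : PySem.Str.count num "-" = 0 := by
      rw [PySem.Str.count_eq]
      rw [show ("-" : String).toList = ['-'] from rfl, pv_count_singleton]
      exact List.count_eq_zero.mpr hdash
    have hcc : PySem.Str.count num "," = 0 := by
      rw [PySem.Str.count_eq]
      rw [show ("," : String).toList = [','] from rfl, pv_count_singleton]
      exact List.count_eq_zero.mpr hcomma
    have hfind : PySem.Str.find num "-" = -1 := by
      rw [PySem.Str.find_eq]
      apply (PySem.Chars.find_eq_neg_one_iff _ _).mpr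
      rw [show ("-" : String).toList = ['-'] from rfl, pv_singleton_infix_iff]
      exact hdash
    have hcdot : PySem.Str.count num "." = num.toList.count '.' := by
      rw [PySem.Str.count_eq]
      rw [show ("." : String).toList = ['.'] from rfl, pv_count_singleton]
    have hlen : (PySem.Str.len num == 0) = num.toList.isEmpty := by
      rw [Bool.eq_iff_iff]
      simp [List.isEmpty_iff, List.length_eq_zero_iff, ← String.length_toList,
        Int.natCast_eq_zero]
    rw [hcd, hcc, hfind, hcdot, hlen, hall]
    by_cases hemp : num.toList.isEmpty = true
    · simp [hemp]
    · simp only [Bool.not_eq_true] at hemp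
      by_cases hdot : num.toList.count '.' ≤ 1
      · simp [hemp, hdot]
      · simp [hemp, hdot]
        omega
  · -- some char is outside "01234." : both sides false
    simp only [Bool.not_eq_true] at hall
    rw [hall]
    simp

-- the core of B: both partition pieces digit-only ⟺ all chars 0-4 or '.', at most one '.'
theorem pv_key (l : List Char) :
    ((pvPartitionDot l).1.all pvD && (pvPartitionDot l).2.all pvD)
      = (l.all pvF && decide (l.count '.' ≤ 1)) := by
  induction l with
  | nil => rfl
  | cons c cs ih =>
    by_cases hc : c = '.'
    · subst hc
      rw [show pvPartitionDot ('.' :: cs) = ([], cs) from by simp [pvPartitionDot]]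
      rw [show ('.' :: cs).all pvF = cs.all pvF from by
        simp [List.all_cons, show pvF '.' = true from rfl]]
      rw [List.count_cons_self]
      simp only [List.all_nil, Bool.true_and]
      cases hall : cs.all pvD with
      | true =>
        have hmem : ∀ x ∈ cs, pvD x = true := List.all_eq_true.mp hall
        have h5 : cs.all pvF = true := by
          rw [List.all_eq_true]
          intro x hx
          rw [pvF_eq]
          simp [hmem x hx]
        have hnodot : cs.count '.' = 0 := by
          apply List.count_eq_zero.mpr
          intro hdot
          have := hmem _ hdot
          rw [pvD_dot] at this
          exact Bool.false_ne_true this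
        rw [h5, hnodot]
        simp
      | false =>
        obtain ⟨x, hx, hxd⟩ := List.all_eq_false.mp hall
        rw [Bool.not_eq_true] at hxd
        cases h5 : cs.all pvF with
        | false => simp [hall]
        | true =>
          have hx' : x = '.' := by
            have h := List.all_eq_true.mp h5 x hx
            rw [pvF_eq, hxd, Bool.false_or, beq_iff_eq] at h
            exact h
          subst hx'
          have hcnt : 1 ≤ cs.count '.' := List.one_le_count_iff.mpr hx
          have hdec : decide (cs.count '.' + 1 ≤ 1) = false := by
            simp
            omega
          rw [hdec]
          simp
    · simp only [pvPartitionDot, if_neg hc, List.all_cons, List.count_cons_of_ne hc,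
        pvF_eq c]
      rw [show (c == '.') = false from beq_eq_false_iff_ne.mpr hc, Bool.or_false]
      cases hd : pvD c with
      | false => simp
      | true =>
        simp only [Bool.true_and]
        exact ih

-- B equals the characterization
theorem pv_B_eq (num : String) : check_is_fiveish_alt num = pvGood num.toList := by
  have e : check_is_fiveish_alt num
      = (!num.toList.isEmpty && (pvPartitionDot num.toList).1.all pvD
          && (pvPartitionDot num.toList).2.all pvD) := rfl
  rw [e, pvGood, Bool.and_assoc, pv_key, ← Bool.and_assoc]

-- ===== VERDICT (by name: the statement is the Claim_ definition above) =====
theorem check_is_fiveish_spec : Claim_equal_check_is_fiveish := by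
  intro num _
  unfold Spec_check_is_fiveish
  rw [pv_A_eq, pv_B_eq]
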